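-- pv_equiv track=rewrite | github.com/shopnilsazal/HackerRank | Contests/Week of Code 24/happy_ladybugs.py | traverse_string
-- ===== SOURCE A (Python) =====
-- def traverse_string(s):
--     count = 0
--     for c1, c2 in zip(s, s[1:]):
--         if c1 == c2:
--             count += 1
--     if count == len(set(s)):
--         return True
--     return False
-- ===== SOURCE B (Python) =====
-- def traverse_string(s):
--     # Count adjacent-equal pairs by divide and conquer: split the string in
--     # half, count pairs in each half, and add 1 if the boundary characters
--     # match. Happy iff that count equals the number of distinct characters.
--     def pairs(t):
--         if len(t) < 2:
--             return 0
--         m = len(t) // 2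
--         return pairs(t[:m]) + pairs(t[m:]) + (t[m - 1] == t[m])
--     return pairs(s) == len(set(s))
-- ===== Notes on version B (the rewrite author's own statement) =====
-- stated objective: alternative
-- what changed: B counts adjacent-equal pairs by divide and conquer (recursively split the string in half and add a boundary comparison) instead of A's linear zip(s, s[1:]) scan.
import Mathlib
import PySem

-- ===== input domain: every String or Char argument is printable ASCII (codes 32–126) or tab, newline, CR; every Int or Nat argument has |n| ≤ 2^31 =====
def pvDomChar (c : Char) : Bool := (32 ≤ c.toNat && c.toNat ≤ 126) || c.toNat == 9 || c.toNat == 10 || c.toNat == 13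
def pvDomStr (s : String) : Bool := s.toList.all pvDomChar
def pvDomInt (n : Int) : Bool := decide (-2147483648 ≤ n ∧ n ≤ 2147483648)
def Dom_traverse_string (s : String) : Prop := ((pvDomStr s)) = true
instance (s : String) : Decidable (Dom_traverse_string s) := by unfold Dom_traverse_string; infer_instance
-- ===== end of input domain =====

-- B counts adjacent-equal pairs by divide and conquer (split in half, boundary comparison) instead of A's linear zip(s, s[1:]) scan; same result, different algorithm.
-- ===== PORT A =====
def traverse_string (s : String) : Bool :=
  let count : Int := (s.toList.zip (PySem.List.slice s.toList (some 1) none)).foldl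
    (fun acc p => if p.1 == p.2 then acc + 1 else acc) 0
  if count == ((PySem.Set.ofList s.toList).length : Int) then true else false

-- ===== PORT B =====
-- pairs(t): divide and conquer; t[m-1] and t[m] are always in range (len ≥ 2, 1 ≤ m < len),
-- so List.getD with a dummy default is exact there.
def pairsDC (l : List Char) : Int :=
  if l.length < 2 then 0
  else
    let m := l.length / 2
    pairsDC (l.take m) + pairsDC (l.drop m) +
      (if l.getD (m - 1) 'a' == l.getD m 'a' then 1 else 0)
termination_by l.length
decreasing_by
  · simp only [List.length_take]; omega
  · simp only [List.length_drop]; omega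

def traverse_string_alt (s : String) : Bool :=
  pairsDC s.toList == ((PySem.Set.ofList s.toList).length : Int)

-- ===== PRECONDITION & SPEC =====
def Spec_traverse_string (s : String) (out : Bool) : Prop := out = traverse_string_alt s
instance (s : String) (out : Bool) : Decidable (Spec_traverse_string s out) := by unfold Spec_traverse_string; infer_instance

-- ===== CLAIM (what is proved, stated in full; the proofs are below) =====
def Claim_equal_traverse_string : Prop := ∀ (s : String), Dom_traverse_string s → Spec_traverse_string s (traverse_string s)

-- ===== LEMMAS AND PROOFS =====

-- A's pair count, as a standalone function of the list (acc-free form of A's fold)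
def pairCount (l : List Char) : Int :=
  (l.zip (l.drop 1)).foldl (fun acc p => if p.1 == p.2 then acc + 1 else acc) 0

theorem foldl_count_shift (zl : List (Char × Char)) (a : Int) :
    zl.foldl (fun acc p => if p.1 == p.2 then acc + 1 else acc) a
      = a + zl.foldl (fun acc p => if p.1 == p.2 then acc + 1 else acc) 0 := by
  induction zl generalizing a with
  | nil => simp
  | cons p t ih =>
    simp only [List.foldl_cons]
    rw [ih, ih (if p.1 == p.2 then 0 + 1 else 0)]
    split <;> omega

theorem pairCount_cons (c d : Char) (l : List Char) :
    pairCount (c :: d :: l) = (if c = d then 1 else 0) + pairCount (d :: l) := by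
  simp only [pairCount, List.drop_succ_cons, List.drop_zero, List.zip_cons_cons, List.foldl_cons]
  rw [foldl_count_shift]
  by_cases h : c = d <;> simp [h]

-- splitting lemma: pairs of a concatenation = pairs of each part + boundary pair
theorem pairCount_append (a b : List Char) (ha : a ≠ []) (hb : b ≠ []) :
    pairCount (a ++ b) = pairCount a + pairCount b +
      (if a.getLast?.getD 'a' = b.head?.getD 'a' then 1 else 0) := by
  induction a with
  | nil => exact absurd rfl ha
  | cons x a' ih =>
    cases a' with
    | nil =>
      cases b with
      | nil => exact absurd rfl hb
      | cons y t =>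
        simp only [List.cons_append, List.nil_append]
        rw [pairCount_cons]
        simp only [List.getLast?_singleton, List.head?_cons, Option.getD_some]
        have h0 : pairCount [x] = 0 := by simp [pairCount]
        rw [h0]
        by_cases hxy : x = y <;> simp [hxy] <;> ring
    | cons x2 a'' =>
      have h1 : pairCount (x :: x2 :: a'' ++ b) = (if x = x2 then 1 else 0) + pairCount (x2 :: a'' ++ b) := by
        simpa using pairCount_cons x x2 (a'' ++ b)
      have h2 : pairCount (x :: x2 :: a'') = (if x = x2 then 1 else 0) + pairCount (x2 :: a'') := pairCount_cons x x2 a''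
      have h3 := ih (by simp)
      have hl : (x :: x2 :: a'').getLast? = (x2 :: a'').getLast? := by
        simp [List.getLast?_cons_cons]
      simp only [List.cons_append] at h1 h3 ⊢
      rw [h1, h3, hl, h2]
      omega

theorem pairsDC_eq_pairCount : ∀ (n : Nat) (l : List Char), l.length ≤ n → pairsDC l = pairCount l := by
  intro n
  induction n with
  | zero =>
    intro l hl
    have : l = [] := List.eq_nil_of_length_eq_zero (Nat.le_zero.mp hl)
    subst this; simp [pairsDC, pairCount]
  | succ n ih =>
    intro l hl
    rw [pairsDC]
    by_cases hlen : l.length < 2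
    · rw [if_pos hlen]
      match l, hlen with
      | [], _ => simp [pairCount]
      | [x], _ => simp [pairCount]
    · rw [if_neg hlen]
      rw [Nat.not_lt] at hlen
      set m := l.length / 2 with hm
      have hm1 : 1 ≤ m := by omega
      have hmlt : m < l.length := by omega
      have hta : (l.take m).length = m := by simp; omega
      have htb : (l.drop m).length = l.length - m := by simp
      have ha : l.take m ≠ [] := by
        intro h; rw [h] at hta; simp at hta; omega
      have hbne : l.drop m ≠ [] := by
        intro h; rw [h] at htb; simp at htb; omega
      have e1 : pairsDC (l.take m) = pairCount (l.take m) := ih _ (by simp; omega)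
      have e2 : pairsDC (l.drop m) = pairCount (l.drop m) := ih _ (by simp; omega)
      have hsplit := pairCount_append (l.take m) (l.drop m) ha hbne
      rw [List.take_append_drop] at hsplit
      have hlast : (l.take m).getLast? = l[m - 1]? := by
        rw [List.getLast?_eq_getElem?, hta, List.getElem?_take_of_lt (by omega)]
      have hhead : (l.drop m).head? = l[m]? := by
        rw [List.head?_drop]
      have hgd1 : l.getD (m - 1) 'a' = (l.take m).getLast?.getD 'a' := by
        rw [hlast, List.getD_eq_getElem?_getD]
      have hgd2 : l.getD m 'a' = (l.drop m).head?.getD 'a' := by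
        rw [hhead, List.getD_eq_getElem?_getD]
      show pairsDC (l.take m) + pairsDC (l.drop m) +
          (if (l.getD (m - 1) 'a' == l.getD m 'a') then (1 : Int) else 0) = pairCount l
      rw [hsplit, e1, e2, hgd1, hgd2]
      simp only [beq_iff_eq]

-- ===== VERDICT =====
theorem traverse_string_spec : Claim_equal_traverse_string := by
  intro s _
  unfold Spec_traverse_string traverse_string traverse_string_alt
  have hs : PySem.List.slice s.toList (some 1) none = s.toList.drop 1 := by
    simpa using PySem.List.slice_from_natCast s.toList 1
  rw [hs]
  show (if (pairCount s.toList == ((PySem.Set.ofList s.toList).length : Int)) then true else false)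
      = (pairsDC s.toList == ((PySem.Set.ofList s.toList).length : Int))
  rw [pairsDC_eq_pairCount s.toList.length s.toList le_rfl]
  cases hb : (pairCount s.toList == ((PySem.Set.ofList s.toList).length : Int)) <;> simp
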